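-- pv_equiv track=rewrite | github.com/Pawlo77/PPPD | uczace/Lab06/2019-MAT-07.py | TrinomialPlusInt
-- ===== SOURCE A (Python) =====
-- def get_next_row(row, n):
--     next_row = [0 for _ in range(len(row) + 2)]
--
--     next_row[0] = row[0]
--     next_row[1] = row[0] + row[1]
--     next_row[len(next_row) - 1] = row[len(row) - 1]
--     next_row[len(next_row) - 2] = row[len(row) - 1] + row[len(row) - 2]
--
--     for i in range(2, len(next_row) - 2):
--         next_row[i] = row[i - 2] + row[i - 1] + row[i]
--     return next_row
--
-- def TrinomialPlusInt(a, b, c, d, n):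
--     if n < 1:
--         raise Exception("Zle n")
--     if n == 1:
--         return [a]
--     elif n == 2:
--         return [b, c, d]
--
--     row = [b, c, d]
--     for i in range(3, n + 1):
--         row = get_next_row(row, i)
--     return row
-- ===== SOURCE B (Python) =====
-- def TrinomialPlusInt(a, b, c, d, n):
--     # O(n): row n = (b + c x + d x^2) * (1 + x + x^2)^(n-2); the trinomial
--     # coefficients t[k] of (1+x+x^2)^m are produced by the exact integer
--     # recurrence (k+1) t[k+1] = (m-k) t[k] + (2m-k+1) t[k-1].
--     if n < 1:
--         raise Exception("Zle n")
--     if n == 1: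
--         return [a]
--     m = n - 2
--     t = [1]
--     for k in range(2 * m):
--         prev = t[k - 1] if k >= 1 else 0
--         t.append(((m - k) * t[k] + (2 * m - k + 1) * prev) // (k + 1))
--     g = lambda i: t[i] if 0 <= i < len(t) else 0
--     return [b * g(k) + c * g(k - 1) + d * g(k - 2) for k in range(2 * m + 3)]
-- ===== Notes on version B (the rewrite author's own statement) =====
-- stated objective: faster
-- what changed: Replaces the row-by-row trinomial-triangle iteration (n rows, each rebuilt by windowed sums) with the O(1)-per-coefficient integer recurrence (k+1)t[k+1]=(m-k)t[k]+(2m-k+1)t[k-1] for the coefficients of (1+x+x^2)^(n-2), followed by one constant-width convolution with the seed (b,c,d).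
import Mathlib
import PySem

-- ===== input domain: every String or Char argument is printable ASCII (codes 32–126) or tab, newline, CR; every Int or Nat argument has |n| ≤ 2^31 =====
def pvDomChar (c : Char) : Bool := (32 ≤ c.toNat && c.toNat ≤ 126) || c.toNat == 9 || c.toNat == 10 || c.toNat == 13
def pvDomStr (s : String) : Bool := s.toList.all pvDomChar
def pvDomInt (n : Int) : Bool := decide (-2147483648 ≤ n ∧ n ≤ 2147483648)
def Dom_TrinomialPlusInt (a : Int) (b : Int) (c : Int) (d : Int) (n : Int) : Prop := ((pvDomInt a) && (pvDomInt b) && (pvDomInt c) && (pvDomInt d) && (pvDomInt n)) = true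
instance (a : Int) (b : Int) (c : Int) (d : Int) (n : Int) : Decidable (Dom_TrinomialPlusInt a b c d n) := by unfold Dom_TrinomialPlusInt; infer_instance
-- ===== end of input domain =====

-- B replaces A's row-by-row triangle iteration by the O(1)-per-coefficient integer
-- recurrence for the trinomial coefficients plus one 3-tap convolution (objective: faster).

-- ===== PORT A =====
-- port of get_next_row; every list index A uses here is a nonnegative in-range
-- index for the rows A builds (length ≥ 3), so getD/set is exact there
def getNextRow (row : List Int) (n : Int) : List Int :=
  let next0 := List.replicate (row.length + 2) (0 : Int)
  let next1 := next0.set 0 (row.getD 0 0)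
  let next2 := next1.set 1 (row.getD 0 0 + row.getD 1 0)
  let next3 := next2.set (row.length + 1) (row.getD (row.length - 1) 0)
  let next4 := next3.set row.length (row.getD (row.length - 1) 0 + row.getD (row.length - 2) 0)
  (List.range' 2 (row.length + 2 - 2 - 2)).foldl
    (fun nx i => nx.set i (row.getD (i - 2) 0 + row.getD (i - 1) 0 + row.getD i 0)) next4

def TrinomialPlusInt (a : Int) (b : Int) (c : Int) (d : Int) (n : Int) : List Int :=
  if n < 1 then []                      -- Python raises Exception("Zle n") here; excluded by Pre_
  else if n = 1 then [a]
  else if n = 2 then [b, c, d]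
  else (List.range' 3 ((n + 1 - 3).toNat)).foldl (fun (row : List Int) (i : ℕ) => getNextRow row (i : Int)) [b, c, d]

-- ===== PORT B =====
-- the lambda g of Source B: t[i] if 0 <= i < len(t) else 0
def pyG (t : List Int) (i : Int) : Int :=
  if 0 ≤ i ∧ i < (t.length : Int) then t.getD i.toNat 0 else 0

def TrinomialPlusInt_alt (a : Int) (b : Int) (c : Int) (d : Int) (n : Int) : List Int :=
  if n < 1 then []                      -- Python raises Exception("Zle n") here; excluded by Pre_
  else if n = 1 then [a]
  else
    let m : Nat := (n - 2).toNat
    let t := (List.range (2 * m)).foldl (fun (t : List Int) (k : ℕ) =>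
      let prev := if 1 ≤ k then t.getD (k - 1) 0 else 0
      t ++ [PySem.Int.floordiv (((m : Int) - k) * t.getD k 0 + (2 * (m : Int) - k + 1) * prev)
              ((k : Int) + 1)]) [1]
    (List.range (2 * m + 3)).map (fun (k : ℕ) =>
      b * pyG t (k : Int) + c * pyG t ((k : Int) - 1) + d * pyG t ((k : Int) - 2))

-- ===== PRECONDITION & SPEC =====
-- Pre_ excludes exactly n < 1, where Python A raises Exception("Zle n")
def Pre_TrinomialPlusInt (a : Int) (b : Int) (c : Int) (d : Int) (n : Int) : Prop := 1 ≤ n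
instance (a : Int) (b : Int) (c : Int) (d : Int) (n : Int) : Decidable (Pre_TrinomialPlusInt a b c d n) := by unfold Pre_TrinomialPlusInt; infer_instance
def pvWitness_TrinomialPlusInt : Int × Int × Int × Int × Int := (1, 2, 3, 4, 5)

def Spec_TrinomialPlusInt (a : Int) (b : Int) (c : Int) (d : Int) (n : Int) (out : List Int) : Prop := out = TrinomialPlusInt_alt a b c d n
instance (a : Int) (b : Int) (c : Int) (d : Int) (n : Int) (out : List Int) : Decidable (Spec_TrinomialPlusInt a b c d n out) := by unfold Spec_TrinomialPlusInt; infer_instance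

-- ===== CLAIM (what is proved, stated in full; the proofs are below) =====
def Claim_equal_TrinomialPlusInt : Prop := ∀ (a : Int) (b : Int) (c : Int) (d : Int) (n : Int), Dom_TrinomialPlusInt a b c d n → Pre_TrinomialPlusInt a b c d n → Spec_TrinomialPlusInt a b c d n (TrinomialPlusInt a b c d n)

-- ===== LEMMAS AND PROOFS =====

-- trinomial coefficients: Tt m k = coefficient of x^k in (1+x+x^2)^m (0 off-support)
def Tt : ℕ → ℤ → ℤ
  | 0, k => if k = 0 then 1 else 0
  | m + 1, k => Tt m k + Tt m (k - 1) + Tt m (k - 2)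

theorem Tt_neg (m : ℕ) : ∀ k : ℤ, k < 0 → Tt m k = 0 := by
  induction m with
  | zero => intro k hk; simp [Tt]; omega
  | succ m ih => intro k hk; simp [Tt, ih k (by omega), ih (k-1) (by omega), ih (k-2) (by omega)]

theorem Tt_big (m : ℕ) : ∀ k : ℤ, 2 * m < k → Tt m k = 0 := by
  induction m with
  | zero => intro k hk; simp [Tt]; omega
  | succ m ih =>
      intro k hk
      push_cast at hk
      simp [Tt, ih k (by push_cast; omega), ih (k-1) (by push_cast; omega),
            ih (k-2) (by push_cast; omega)]

theorem Tt_zero (m : ℕ) : Tt m 0 = 1 := by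
  induction m with
  | zero => simp [Tt]
  | succ m ih => simp [Tt, ih, Tt_neg m (-1) (by omega), Tt_neg m (-2) (by omega)]

theorem Tt_rec (m : ℕ) : ∀ k : ℤ,
    (k + 1) * Tt m (k + 1) = ((m : ℤ) - k) * Tt m k + (2 * (m : ℤ) - k + 1) * Tt m (k - 1) := by
  induction m with
  | zero =>
      intro k
      simp only [Tt, Nat.cast_zero]
      split_ifs <;> ring_nf <;> omega
  | succ m ih =>
      intro k
      have h1 := ih k
      have h2 := ih (k - 1)
      have h3 := ih (k - 2)
      simp only [Tt] at *
      push_cast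
      ring_nf at h1 h2 h3 ⊢
      linarith [h1, h2, h3]

theorem getD_set (l : List Int) (i j : ℕ) (v : Int) :
    (l.set i v).getD j 0 = if i = j ∧ j < l.length then v else l.getD j 0 := by
  simp [List.getD, List.getElem?_set]
  split_ifs with h1 h2 h3 h4 <;> simp_all

theorem foldl_set_length (f : ℕ → Int) (s c : ℕ) (l : List Int) :
    ((List.range' s c).foldl (fun nx i => nx.set i (f i)) l).length = l.length := by
  induction c with
  | zero => rfl
  | succ c ih => rw [List.range'_1_concat (s := s), List.foldl_append]; simp [ih]

theorem foldl_set_getD (f : ℕ → Int) (s c : ℕ) (l : List Int) (j : ℕ) :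
    ((List.range' s c).foldl (fun nx i => nx.set i (f i)) l).getD j 0
      = if s ≤ j ∧ j < s + c ∧ j < l.length then f j else l.getD j 0 := by
  induction c with
  | zero => simp; intro h1 h2; omega
  | succ c ih =>
      rw [List.range'_1_concat (s := s), List.foldl_append]
      simp only [List.foldl_cons, List.foldl_nil]
      rw [getD_set, foldl_set_length, ih]
      split_ifs <;> simp_all <;> omega

theorem step_length (row : List Int) (nn : Int) :
    (getNextRow row nn).length = row.length + 2 := by
  unfold getNextRow
  rw [foldl_set_length]
  simp

theorem step_char (row : List Int) (nn : Int) (h : 3 ≤ row.length) (i : Int) :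
    pyG (getNextRow row nn) i = pyG row i + pyG row (i - 1) + pyG row (i - 2) := by
  have hlen := step_length row nn
  unfold pyG
  rw [hlen]
  by_cases hi : 0 ≤ i ∧ i < ((row.length + 2 : ℕ) : Int)
  · rw [if_pos hi]
    obtain ⟨hi0, hi2⟩ := hi
    lift i to ℕ using hi0 with j hj
    have e1 : ((j : ℤ) - 1).toNat = j - 1 := by omega
    have e2 : ((j : ℤ) - 2).toNat = j - 2 := by omega
    unfold getNextRow
    rw [foldl_set_getD]
    simp only [List.length_set, List.length_replicate, Int.toNat_natCast, e1, e2]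
    rw [getD_set, getD_set, getD_set, getD_set]
    simp only [List.length_set, List.length_replicate]
    have hjlt : j < row.length + 2 := by push_cast at hi2; omega
    split_ifs
    all_goals try omega
    all_goals try ring
    all_goals try (simp [List.getD_replicate]; omega)
    all_goals (try (have e3 : row.length - 1 = j - 1 := by omega
                    have e4 : row.length - 2 = j - 2 := by omega
                    rw [e3, e4]; try ring))
    all_goals (try (have e3 : row.length - 1 = j - 2 := by omega
                    rw [e3]; try ring))
    all_goals (try (have e5 : j = 1 := (by omega); subst e5; try simp [add_comm]))
    all_goals (try (have e5 : j = 0 := (by omega); subst e5; try simp [add_comm]))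
  · rw [if_neg hi]
    have h1 : ¬ (0 ≤ i ∧ i < (row.length : ℤ)) := by push_cast at hi ⊢; omega
    rw [if_neg h1]
    by_cases h2 : 0 ≤ i - 1 ∧ i - 1 < (row.length : ℤ)
    · exfalso; push_cast at hi; omega
    · rw [if_neg h2]
      by_cases h3 : 0 ≤ i - 2 ∧ i - 2 < (row.length : ℤ)
      · exfalso; push_cast at hi; omega
      · rw [if_neg h3]; ring

theorem loopA_char (b c d : Int) (s : ℕ) (cnt : ℕ) :
    ((List.range' s cnt).foldl (fun (row : List Int) (i : ℕ) => getNextRow row (i : Int)) [b, c, d]).length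
        = 3 + 2 * cnt
    ∧ ∀ i : Int, pyG ((List.range' s cnt).foldl (fun (row : List Int) (i : ℕ) => getNextRow row (i : Int)) [b, c, d]) i
        = b * Tt cnt i + c * Tt cnt (i - 1) + d * Tt cnt (i - 2) := by
  induction cnt with
  | zero =>
      refine ⟨by simp, fun i => ?_⟩
      simp only [List.range'_zero, List.foldl_nil, Tt]
      unfold pyG
      by_cases h0 : i = 0
      · subst h0; norm_num
      · by_cases h1 : i = 1
        · subst h1; norm_num
        · by_cases h2 : i = 2
          · subst h2; norm_num; rfl
          · rw [if_neg (by simp; omega)]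
            rw [if_neg h0, if_neg (by omega), if_neg (by omega)]
            ring
  | succ cnt ih =>
      obtain ⟨ihl, ihv⟩ := ih
      rw [List.range'_1_concat (s := s)]
      constructor
      · rw [List.foldl_append]
        simp only [List.foldl_cons, List.foldl_nil]
        rw [step_length, ihl]
        omega
      · intro i
        rw [List.foldl_append]
        simp only [List.foldl_cons, List.foldl_nil]
        rw [step_char _ _ (by omega) i, ihv i, ihv (i - 1), ihv (i - 2)]
        simp only [Tt]
        ring

def tStep (m : ℕ) (t : List Int) (k : ℕ) : List Int :=
  t ++ [PySem.Int.floordiv (((m : Int) - k) * t.getD k 0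
          + (2 * (m : Int) - k + 1) * (if 1 ≤ k then t.getD (k - 1) 0 else 0))
        ((k : Int) + 1)]

theorem tloop_char (m : ℕ) (K : ℕ) :
    ((List.range K).foldl (tStep m) [1]).length = K + 1
    ∧ ∀ j : ℕ, j ≤ K → ((List.range K).foldl (tStep m) [1]).getD j 0 = Tt m j := by
  induction K with
  | zero =>
      refine ⟨rfl, fun j hj => ?_⟩
      interval_cases j
      simp [Tt_zero]
  | succ K ih =>
      obtain ⟨ihl, ihv⟩ := ih
      rw [List.range_succ, List.foldl_append]
      simp only [List.foldl_cons, List.foldl_nil]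
      set tK := (List.range K).foldl (tStep m) [1] with htK
      refine ⟨?_, fun j hj => ?_⟩
      · unfold tStep
        rw [List.length_append, ihl]
        rfl
      · show (tStep m tK K).getD j 0 = Tt m j
        unfold tStep
        rcases Nat.lt_or_ge j (K + 1) with hlt | hge
        · rw [List.getD_append _ _ _ j (by omega)]
          exact ihv j (by omega)
        · have hj1 : j = K + 1 := by omega
          subst hj1
          rw [List.getD_append_right _ _ _ _ (by omega)]
          rw [show K + 1 - tK.length = 0 from by omega]
          simp only [List.getD_cons_zero]
          rw [ihv K le_rfl]
          have hprev : (if 1 ≤ K then tK.getD (K - 1) 0 else 0) = Tt m ((K : ℤ) - 1) := by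
            rcases Nat.eq_zero_or_pos K with hK0 | hK1
            · subst hK0
              rw [if_neg (by omega)]
              rw [show ((0 : ℕ) : ℤ) - 1 = -1 from by norm_num, Tt_neg m (-1) (by omega)]
            · rw [if_pos (by omega), ihv (K - 1) (by omega)]
              congr 1
              omega
          rw [hprev]
          rw [show ((m : Int) - K) * Tt m K + (2 * (m : Int) - K + 1) * Tt m ((K : ℤ) - 1)
                = ((K : ℤ) + 1) * Tt m ((K : ℤ) + 1) from (Tt_rec m K).symm]
          rw [PySem.Int.floordiv_eq_ediv_of_pos (by omega)]
          rw [Int.mul_ediv_cancel_left _ (by omega : ((K : ℤ) + 1) ≠ 0)]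
          norm_cast

-- the full coefficient list: pyG t i = Tt m i for every i
theorem tlist_pyG (m : ℕ) (i : Int) :
    pyG ((List.range (2 * m)).foldl (tStep m) [1]) i = Tt m i := by
  obtain ⟨hl, hv⟩ := tloop_char m (2 * m)
  unfold pyG
  rw [hl]
  by_cases hi : 0 ≤ i ∧ i < ((2 * m + 1 : ℕ) : Int)
  · rw [if_pos hi]
    obtain ⟨hi0, hi2⟩ := hi
    lift i to ℕ using hi0 with j hj
    rw [Int.toNat_natCast]
    exact hv j (by push_cast at hi2; omega)
  · rw [if_neg hi]
    push_cast at hi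
    by_cases h0 : i < 0
    · exact (Tt_neg m i h0).symm
    · exact (Tt_big m i (by omega)).symm

-- bridge: A's loop result equals B's map over the trinomial-coefficient list
theorem main_eq (b c d : Int) (m : ℕ) :
    (List.range' 3 m).foldl (fun (row : List Int) (i : ℕ) => getNextRow row (i : Int)) [b, c, d]
      = (List.range (2 * m + 3)).map (fun (k : ℕ) =>
          b * pyG ((List.range (2 * m)).foldl (tStep m) [1]) (k : Int)
          + c * pyG ((List.range (2 * m)).foldl (tStep m) [1]) ((k : Int) - 1)
          + d * pyG ((List.range (2 * m)).foldl (tStep m) [1]) ((k : Int) - 2)) := by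
  obtain ⟨hAl, hAv⟩ := loopA_char b c d 3 m
  apply List.ext_getElem
  · simp [hAl]; omega
  · intro j hj1 hj2
    have hjlen : j < 3 + 2 * m := by rw [hAl] at hj1; omega
    have hAj : ((List.range' 3 m).foldl (fun (row : List Int) (i : ℕ) => getNextRow row (i : Int))
        [b, c, d]).getD j 0 = b * Tt m j + c * Tt m ((j : ℤ) - 1) + d * Tt m ((j : ℤ) - 2) := by
      have hthis := hAv (j : ℤ)
      unfold pyG at hthis
      rw [if_pos ⟨by omega, by rw [hAl]; push_cast; omega⟩] at hthis
      rw [Int.toNat_natCast] at hthis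
      exact hthis
    rw [← List.getD_eq_getElem _ 0 hj1, hAj]
    rw [List.getElem_map, List.getElem_range, tlist_pyG, tlist_pyG, tlist_pyG]

-- ===== VERDICT (by name: the statement is the Claim_ definition above) =====
theorem TrinomialPlusInt_spec : Claim_equal_TrinomialPlusInt := by
  intro a b c d n _ hpre
  unfold Pre_TrinomialPlusInt at hpre
  unfold Spec_TrinomialPlusInt TrinomialPlusInt TrinomialPlusInt_alt
  rw [if_neg (by omega : ¬ n < 1), if_neg (by omega : ¬ n < 1)]
  by_cases h1 : n = 1
  · rw [if_pos h1, if_pos h1]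
  · rw [if_neg h1, if_neg h1]
    by_cases h2 : n = 2
    · rw [if_pos h2]
      subst h2
      have h := main_eq b c d 0
      simpa using h
    · rw [if_neg h2]
      rw [show (n + 1 - 3 : ℤ) = n - 2 by ring]
      exact main_eq b c d ((n - 2).toNat)
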